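-- pv_equiv track=rewrite | github.com/chenzongyao200127/leetcode_in_rust | src/LCP_41_黑白翻转棋.py | flipChess
-- ===== SOURCE A (Python) =====
-- def flipChess(chessboard: str) -> int:
--     # 定义8个方向
--     dirs = ((-1, -1), (-1, 0), (-1, 1), (0, -1), (0, 1), (1, -1), (1, 0), (1, 1))
--     # 获取棋盘的行数和列数
--     m, n = len(chessboard), len(chessboard[0])
--
--     # 定义一个搜索方法，用于翻转棋子
--     def search(board, i, j):
--         # 将当前位置设置为 'X'
--         board[i][j] = "X"
--         # 初始化翻转计数为0
--         ans = 0
--         # 遍历8个方向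
--         for di, dj in dirs:
--             # 初始化一个临时列表，用于存储需要翻转的棋子位置
--             tmp = []
--             # 初始化新的坐标
--             ni, nj = i, j
--             # 沿着当前方向进行搜索
--             while 0 <= (ni := ni + di) < m and 0 <= (nj := nj + dj) < n:
--                 # 如果新位置是 'X' 或者 '.'，则停止搜索
--                 if board[ni][nj] in "X.":
--                     # 如果新位置是 'X'，则翻转临时列表中的棋子，并更新翻转计数
--                     if board[ni][nj] == "X":
--                         for ti, tj in tmp:
--                             board[ti][tj] = "X"
--                         ans += len(tmp) + sum(search(board, ti, tj) for ti, tj in tmp)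
--                     break
--                 # 如果新位置是 'O'，则将其添加到临时列表
--                 tmp.append((ni, nj))
--         # 返回翻转计数
--         return ans
--
--     # 遍历棋盘上的每个空位置，计算翻转后的最大得分
--     return max((search(list(map(list, chessboard)), i, j) for i in range(m) for j in range(n) if chessboard[i][j] == "."), default=0)
-- ===== SOURCE B (Python) =====
-- # Iterative re-implementation: the recursive flood of flips becomes an explicit
-- # worklist stack of (cell, remaining directions) frames with a running counter.
-- def flipChess(chessboard: str) -> int:
--     dirs = ((-1, -1), (-1, 0), (-1, 1), (0, -1), (0, 1), (1, -1), (1, 0), (1, 1))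
--     m, n = len(chessboard), len(chessboard[0])
--
--     def scan(board, i, j, di, dj):
--         # run of flippable cells along one ray; [] unless the run ends at an 'X'
--         run = []
--         ni, nj = i + di, j + dj
--         while 0 <= ni < m and 0 <= nj < n:
--             c = board[ni][nj]
--             if c == "X":
--                 return run
--             if c == ".":
--                 return []
--             run.append((ni, nj))
--             ni += di
--             nj += dj
--         return []
--
--     def flips(board, i, j):
--         board[i][j] = "X"
--         cnt = 0
--         stack = [(i, j, dirs)]
--         while stack:
--             ci, cj, ds = stack.pop()
--             for idx, (di, dj) in enumerate(ds):
--                 run = scan(board, ci, cj, di, dj)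
--                 if run:
--                     for ti, tj in run:
--                         board[ti][tj] = "X"
--                     cnt += len(run)
--                     stack.append((ci, cj, ds[idx + 1:]))
--                     for cell in reversed(run):
--                         stack.append((cell[0], cell[1], dirs))
--                     break
--         return cnt
--
--     best = 0
--     for i in range(m):
--         for j in range(n):
--             if chessboard[i][j] == ".":
--                 best = max(best, flips([list(row) for row in chessboard], i, j))
--     return best
-- ===== Notes on version B (the rewrite author's own statement) =====
-- stated objective: alternative
-- what changed: A's recursive depth-first search (re-entrant recursion on every flipped cell, summing the recursive counts) is replaced by an iterative worklist: an explicit stack of (cell, remaining-directions) frames and a running flip counter, popped until empty.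
import Mathlib
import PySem

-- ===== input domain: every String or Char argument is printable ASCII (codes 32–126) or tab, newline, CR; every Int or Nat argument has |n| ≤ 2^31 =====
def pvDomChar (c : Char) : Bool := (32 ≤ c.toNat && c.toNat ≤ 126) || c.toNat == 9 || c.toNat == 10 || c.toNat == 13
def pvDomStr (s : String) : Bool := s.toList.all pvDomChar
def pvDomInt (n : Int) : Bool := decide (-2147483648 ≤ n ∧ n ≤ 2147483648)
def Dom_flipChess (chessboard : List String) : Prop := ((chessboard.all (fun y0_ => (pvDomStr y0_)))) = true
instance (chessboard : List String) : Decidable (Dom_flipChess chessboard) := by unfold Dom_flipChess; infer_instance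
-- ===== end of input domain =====

-- B replaces A's recursive flood of flips by an explicit worklist stack of
-- (cell, remaining-directions) frames with a running counter (alternative decomposition,
-- same asymptotic cost).  Both ports: the board is threaded functionally; 'fuel'
-- arguments below only make the same computation total (they are never exhausted).

-- ===== PORT A =====
-- shared board primitives (both Pythons index/mutate the same way)
abbrev PvCell := Int × Int
abbrev PvBoard := List (List Char)

def dirsList : List (Int × Int) :=
  [(-1,-1),(-1,0),(-1,1),(0,-1),(0,1),(1,-1),(1,0),(1,1)]

-- board[i][j]; the default 'X' is only reachable on rows shorter than n, excluded by Pre_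
def getCell (b : PvBoard) (i j : Int) : Char := (b.getD i.toNat []).getD j.toNat 'X'

-- board[i][j] = "X"
def setCell (b : PvBoard) (c : PvCell) : PvBoard :=
  b.set c.1.toNat ((b.getD c.1.toNat []).set c.2.toNat 'X')

-- number of non-'X' cells: termination measure for both ports
def muB (b : PvBoard) : Nat := (b.map (fun r => r.countP (· ≠ 'X'))).sum

def scanFuel (m n : Int) : Nat := (m + n).toNat + 2

-- the inner `while` ray walk of both Pythons: returns (hit an 'X', collected run of
-- flippable cells).  fuel ≥ m+2 ≥ number of iterations, so it is never exhausted.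
def scanRay (m n : Int) (b : PvBoard) (i j di dj : Int) : Nat → Bool × List PvCell
  | 0 => (false, [])
  | f+1 =>
    let ni := i + di
    let nj := j + dj
    if 0 ≤ ni ∧ ni < m ∧ 0 ≤ nj ∧ nj < n then
      let c := getCell b ni nj
      if c = 'X' then (true, [])
      else if c = '.' then (false, [])
      else
        let r := scanRay m n b ni nj di dj f
        (r.1, (ni, nj) :: r.2)
    else (false, [])

-- A's recursive `search`: searchF sets the cell and folds the 8 directions
-- (searchDirsF); on a run ending in 'X' it flips the run and sums the recursive
-- searches over the flipped cells (searchTmpF), exactly as A does.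
mutual
def searchF (m n : Int) (f : Nat) (b : PvBoard) (c : PvCell) : PvBoard × Int :=
  match f with
  | 0 => (b, 0)
  | g+1 => searchDirsF m n g (setCell b c) c dirsList
termination_by (f, 0, 0)

def searchDirsF (m n : Int) (f : Nat) (b : PvBoard) (c : PvCell) :
    List (Int × Int) → PvBoard × Int
  | [] => (b, 0)
  | d :: ds =>
    let s := scanRay m n b c.1 c.2 d.1 d.2 (scanFuel m n)
    if s.1 then
      match s.2 with
      | [] => searchDirsF m n f b c ds            -- empty run: nothing flips, ans += 0
      | t :: ts =>
        let b1 := (t :: ts).foldl setCell b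
        let r1 := searchTmpF m n f b1 (t :: ts)
        let r2 := searchDirsF m n f r1.1 c ds
        (r2.1, ((t :: ts).length : Int) + r1.2 + r2.2)
    else searchDirsF m n f b c ds
termination_by ds => (f, 2, ds.length)

def searchTmpF (m n : Int) (f : Nat) (b : PvBoard) : List PvCell → PvBoard × Int
  | [] => (b, 0)
  | t :: ts =>
    let r1 := searchF m n f b t
    let r2 := searchTmpF m n f r1.1 ts
    (r2.1, r1.2 + r2.2)
termination_by ts => (f, 1, ts.length)
end

-- max((search(copy, i, j) for ...), default=0)
def flipChess (chessboard : List String) : Int :=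
  let m : Int := chessboard.length
  let n : Int := (chessboard.headD "").toList.length
  let rows : PvBoard := chessboard.map (·.toList)
  let vals :=
    (PySem.List.pyRange 0 m 1).flatMap (fun i =>
      ((PySem.List.pyRange 0 n 1).filter (fun j => getCell rows i j = '.')).map (fun j =>
        (searchF m n (muB rows + 1) (chessboard.map (·.toList)) (i, j)).2))
  match vals with
  | [] => 0
  | v :: vs => vs.foldl max v

-- ===== PORT B =====
-- B's `scan` helper: the cells to flip along one ray ([] unless the run ends at 'X')
def scanB (m n : Int) (b : PvBoard) (c : PvCell) (d : Int × Int) : List PvCell :=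
  let s := scanRay m n b c.1 c.2 d.1 d.2 (scanFuel m n)
  if s.1 then s.2 else []

-- B's `for idx, (di, dj) in enumerate(ds)` loop body: first direction that flips,
-- returning (board after flipping, flipped cells, remaining directions)
def procDirs (m n : Int) (b : PvBoard) (c : PvCell) :
    List (Int × Int) → Option (PvBoard × List PvCell × List (Int × Int))
  | [] => none
  | d :: ds =>
    let tmp := scanB m n b c d
    if tmp.isEmpty then procDirs m n b c ds
    else some (tmp.foldl setCell b, tmp, ds)

theorem scan_sound (m n : Int) (b : PvBoard) :
    ∀ (fuel : Nat) (i j di dj : Int) (p : PvCell),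
      p ∈ (scanRay m n b i j di dj fuel).2 →
      getCell b p.1 p.2 ≠ 'X' ∧ getCell b p.1 p.2 ≠ '.' := by
  intro fuel
  induction fuel with
  | zero => intro i j di dj p hp; simp [scanRay] at hp
  | succ f ih =>
    intro i j di dj p hp
    simp only [scanRay] at hp
    split at hp
    · split at hp
      · simp at hp
      · split at hp
        · simp at hp
        · rcases List.mem_cons.1 hp with h | h
          · subst h; exact ⟨by assumption, by assumption⟩
          · exact ih _ _ _ _ _ h
    · simp at hp

-- countP after writing 'X' never increases
theorem countP_set_X_le : ∀ (r : List Char) (j : Nat),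
    (r.set j 'X').countP (· ≠ 'X') ≤ r.countP (· ≠ 'X') := by
  intro r
  induction r with
  | nil => intro j; simp
  | cons a t ih =>
    intro j
    cases j with
    | zero => simp only [List.set_cons_zero, List.countP_cons]; simp
    | succ j => simp only [List.set_cons_succ, List.countP_cons]; have := ih j; omega

theorem countP_set_X_lt : ∀ (r : List Char) (j : Nat), r.getD j 'X' ≠ 'X' →
    (r.set j 'X').countP (· ≠ 'X') < r.countP (· ≠ 'X') := by
  intro r
  induction r with
  | nil => intro j h; simp at h
  | cons a t ih =>
    intro j h
    cases j with
    | zero => simp at h; simp [h]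
    | succ j =>
      simp only [List.getD_cons_succ] at h
      simp only [List.set_cons_succ, List.countP_cons]
      have := ih j h; omega

theorem muB_cons (r : List Char) (t : PvBoard) :
    muB (r :: t) = r.countP (· ≠ 'X') + muB t := by
  simp [muB]

theorem muB_setRow_le : ∀ (b : PvBoard) (k j : Nat),
    muB (b.set k ((b.getD k []).set j 'X')) ≤ muB b := by
  intro b
  induction b with
  | nil => intro k j; simp
  | cons r t ih =>
    intro k j
    cases k with
    | zero =>
      simp only [List.getD_cons_zero, List.set_cons_zero, muB_cons]
      have := countP_set_X_le r j; omega
    | succ k =>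
      simp only [List.getD_cons_succ, List.set_cons_succ, muB_cons]
      have := ih k j; omega

theorem muB_setRow_lt : ∀ (b : PvBoard) (k j : Nat),
    (b.getD k []).getD j 'X' ≠ 'X' →
    muB (b.set k ((b.getD k []).set j 'X')) < muB b := by
  intro b
  induction b with
  | nil => intro k j h; simp at h
  | cons r t ih =>
    intro k j h
    cases k with
    | zero =>
      simp only [List.getD_cons_zero] at h ⊢
      simp only [List.set_cons_zero, muB_cons]
      have := countP_set_X_lt r j h; omega
    | succ k =>
      simp only [List.getD_cons_succ] at h ⊢
      simp only [List.set_cons_succ, muB_cons]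
      have := ih k j h; omega

theorem muB_set_le (b : PvBoard) (c : PvCell) : muB (setCell b c) ≤ muB b :=
  muB_setRow_le b c.1.toNat c.2.toNat

theorem muB_set_lt (b : PvBoard) (c : PvCell) (h : getCell b c.1 c.2 ≠ 'X') :
    muB (setCell b c) < muB b :=
  muB_setRow_lt b c.1.toNat c.2.toNat h

theorem muB_foldl_le (b : PvBoard) (l : List PvCell) : muB (l.foldl setCell b) ≤ muB b := by
  induction l generalizing b with
  | nil => simp
  | cons t ts ih => exact le_trans (ih (setCell b t)) (muB_set_le b t)

theorem muB_foldl_lt (b : PvBoard) (t : PvCell) (ts : List PvCell)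
    (h : getCell b t.1 t.2 ≠ 'X') : muB ((t :: ts).foldl setCell b) < muB b := by
  simp only [List.foldl_cons]
  exact lt_of_le_of_lt (muB_foldl_le (setCell b t) ts) (muB_set_lt b t h)

theorem procDirs_mu (m n : Int) (b b' : PvBoard) (c : PvCell) (tmp : List PvCell)
    (ds' : List (Int × Int)) :
    ∀ ds, procDirs m n b c ds = some (b', tmp, ds') → muB b' < muB b := by
  intro ds
  induction ds with
  | nil => intro h; simp [procDirs] at h
  | cons d ds ih =>
    intro h
    simp only [procDirs] at h
    split at h
    · exact ih h
    · rename_i hne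
      rw [Option.some.injEq, Prod.mk.injEq, Prod.mk.injEq] at h
      obtain ⟨hb, ht, -⟩ := h
      rcases htmp : scanB m n b c d with _ | ⟨t, ts⟩
      · rw [htmp] at hne; simp at hne
      · have hmem : t ∈ (scanRay m n b c.1 c.2 d.1 d.2 (scanFuel m n)).2 := by
          by_cases hs : (scanRay m n b c.1 c.2 d.1 d.2 (scanFuel m n)).1
          · have : scanB m n b c d = (scanRay m n b c.1 c.2 d.1 d.2 (scanFuel m n)).2 := by
              simp [scanB, hs]
            rw [this] at htmp; rw [htmp]; exact List.mem_cons_self ..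
          · have : scanB m n b c d = [] := by simp [scanB, hs]
            rw [this] at htmp; cases htmp
        have hX := (scan_sound m n b _ c.1 c.2 d.1 d.2 t hmem).1
        rw [← hb, htmp]
        exact muB_foldl_lt b t ts hX

-- B's `while stack` loop: pop a frame, find its first flipping direction, flip,
-- count, push the flipped cells (full direction list) and the interrupted frame.
def flipLoop (m n : Int) (b : PvBoard) (cnt : Int) :
    List (PvCell × List (Int × Int)) → Int
  | [] => cnt
  | (c, ds) :: rest =>
    match hpd : procDirs m n b c ds with
    | none => flipLoop m n b cnt rest
    | some (b', tmp, ds') =>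
      flipLoop m n b' (cnt + tmp.length)
        (tmp.map (fun t => (t, dirsList)) ++ (c, ds') :: rest)
termination_by stack => (muB b, stack.length)
decreasing_by
  · exact Prod.Lex.right _ (by simp)
  · exact Prod.Lex.left _ _ (procDirs_mu m n b b' c tmp ds' ds hpd)

def flipsB (m n : Int) (b : PvBoard) (c : PvCell) : Int :=
  flipLoop m n (setCell b c) 0 [(c, dirsList)]

-- running maximum over the empty seed cells
def flipChess_alt (chessboard : List String) : Int :=
  let m : Int := chessboard.length
  let n : Int := (chessboard.headD "").toList.length
  let rows : PvBoard := chessboard.map (·.toList)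
  (PySem.List.pyRange 0 m 1).foldl (fun best i =>
    (PySem.List.pyRange 0 n 1).foldl (fun best j =>
      if getCell rows i j = '.' then
        max best (flipsB m n (chessboard.map (·.toList)) (i, j))
      else best) best) 0

-- ===== PRECONDITION & SPEC =====
-- Pre_ excludes exactly the inputs where Python A raises an IndexError: the empty
-- board (len(chessboard[0])), and boards with a row shorter than the first row
-- (board[ni][nj] / chessboard[i][j] with j < n).
def Pre_flipChess (chessboard : List String) : Prop :=
  chessboard ≠ [] ∧
    ∀ r ∈ chessboard, (chessboard.headD "").toList.length ≤ r.toList.length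
instance (chessboard : List String) : Decidable (Pre_flipChess chessboard) := by
  unfold Pre_flipChess; infer_instance

def pvWitness_flipChess : List String := [".O.X", "OOX.", ".X.."]

def Spec_flipChess (chessboard : List String) (out : Int) : Prop := out = flipChess_alt chessboard
instance (chessboard : List String) (out : Int) : Decidable (Spec_flipChess chessboard out) := by
  unfold Spec_flipChess; infer_instance

-- ===== CLAIM (what is proved, stated in full; the proofs are below) =====
def Claim_equal_flipChess : Prop := ∀ (chessboard : List String), Dom_flipChess chessboard → Pre_flipChess chessboard → Spec_flipChess chessboard (flipChess chessboard)

-- ===== LEMMAS AND PROOFS =====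

-- list-level set/getD facts
theorem lget_set_ne {α : Type} : ∀ (l : List α) (k n : Nat) (x d : α), k ≠ n →
    (l.set k x).getD n d = l.getD n d := by
  intro l
  induction l with
  | nil => intro k n x d h; simp
  | cons a t ih =>
    intro k n x d h
    cases k with
    | zero =>
      cases n with
      | zero => exact absurd rfl h
      | succ n => simp
    | succ k =>
      cases n with
      | zero => simp
      | succ n => simpa using ih k n x d (by omega)

theorem lget_set_self {α : Type} : ∀ (l : List α) (k : Nat) (x d : α), k < l.length →
    (l.set k x).getD k d = x := by
  intro l
  induction l with
  | nil => intro k x d h; simp at h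
  | cons a t ih =>
    intro k x d h
    cases k with
    | zero => simp
    | succ k => simpa using ih k x d (by simpa using Nat.lt_of_succ_lt_succ h)

theorem lset_oob {α : Type} : ∀ (l : List α) (k : Nat) (x : α), l.length ≤ k →
    l.set k x = l := by
  intro l
  induction l with
  | nil => intro k x h; simp
  | cons a t ih =>
    intro k x h
    cases k with
    | zero => simp at h
    | succ k => simpa using ih k x (by simpa using Nat.le_of_succ_le_succ h)

theorem lset_getD_self {α : Type} : ∀ (l : List α) (k : Nat) (d : α), k < l.length →
    l.set k (l.getD k d) = l := by
  intro l
  induction l with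
  | nil => intro k d h; simp at h
  | cons a t ih =>
    intro k d h
    cases k with
    | zero => simp
    | succ k => simpa using ih k d (by simpa using Nat.lt_of_succ_lt_succ h)

theorem getD_oob {α : Type} (l : List α) (k : Nat) (d : α) (h : l.length ≤ k) :
    l.getD k d = d := by
  simp [List.getD_eq_getElem?_getD, List.getElem?_eq_none h]

-- the only mutation either program performs writes 'X'; hence 'X'-ness persists
theorem getCell_set_cases (b : PvBoard) (q : PvCell) (i j : Int) :
    getCell (setCell b q) i j = getCell b i j ∨ getCell (setCell b q) i j = 'X' := by
  unfold getCell setCell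
  by_cases hk : q.1.toNat = i.toNat
  · by_cases hlen : q.1.toNat < b.length
    · rw [hk] at hlen ⊢
      rw [lget_set_self _ _ _ _ hlen]
      by_cases hj : q.2.toNat = j.toNat
      · rw [hj]
        by_cases hjlen : j.toNat < (b.getD i.toNat []).length
        · right; exact lget_set_self _ _ _ _ hjlen
        · left; rw [lset_oob _ _ _ (by omega)]
      · left; rw [lget_set_ne _ _ _ _ _ hj]
    · left; rw [lset_oob _ _ _ (by omega)]
  · left; rw [lget_set_ne _ _ _ _ _ hk]

theorem getCell_persist (b : PvBoard) (q : PvCell) (i j : Int)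
    (h : getCell b i j = 'X') : getCell (setCell b q) i j = 'X' := by
  rcases getCell_set_cases b q i j with hc | hc
  · rw [hc, h]
  · exact hc

theorem getCell_foldl_persist (i j : Int) : ∀ (l : List PvCell) (b : PvBoard),
    getCell b i j = 'X' → getCell (l.foldl setCell b) i j = 'X' := by
  intro l
  induction l with
  | nil => intro b h; simpa using h
  | cons t ts ih => intro b h; exact ih (setCell b t) (getCell_persist b t i j h)

theorem getCell_set_self (b : PvBoard) (q : PvCell) :
    getCell (setCell b q) q.1 q.2 = 'X' := by
  unfold getCell setCell
  by_cases hk : q.1.toNat < b.length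
  · rw [lget_set_self _ _ _ _ hk]
    by_cases hj : q.2.toNat < (b.getD q.1.toNat []).length
    · exact lget_set_self _ _ _ _ hj
    · rw [lset_oob _ _ _ (by omega)]; exact getD_oob _ _ _ (by omega)
  · rw [lset_oob _ _ _ (by omega)]
    rcases Nat.lt_or_ge q.1.toNat b.length with h | h
    · omega
    · rw [getD_oob b _ [] h]; simp

theorem getCell_foldl_mem : ∀ (l : List PvCell) (b : PvBoard) (t : PvCell), t ∈ l →
    getCell (l.foldl setCell b) t.1 t.2 = 'X' := by
  intro l
  induction l with
  | nil => intro b t h; cases h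
  | cons a as ih =>
    intro b t h
    rcases List.mem_cons.1 h with h | h
    · subst h
      exact getCell_foldl_persist _ _ as (setCell b t) (getCell_set_self b t)
    · exact ih (setCell b a) t h

theorem setCell_id (b : PvBoard) (q : PvCell) (h : getCell b q.1 q.2 = 'X') :
    setCell b q = b := by
  unfold getCell at h
  unfold setCell
  by_cases hk : q.1.toNat < b.length
  · by_cases hj : q.2.toNat < (b.getD q.1.toNat []).length
    · rw [← h, lset_getD_self _ _ _ hj, lset_getD_self _ _ _ hk]
    · rw [lset_oob (b.getD q.1.toNat []) q.2.toNat 'X' (by omega),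
          lset_getD_self b q.1.toNat [] hk]
  · rw [lset_oob b q.1.toNat _ (by omega)]

-- monotonicity of A's recursion: the measure never grows, 'X'-ness persists
theorem AM (m n : Int) : ∀ f : Nat,
    (∀ b c, muB (searchF m n f b c).1 ≤ muB b ∧
      ∀ i j, getCell b i j = 'X' → getCell (searchF m n f b c).1 i j = 'X') ∧
    (∀ b ts, muB (searchTmpF m n f b ts).1 ≤ muB b ∧
      ∀ i j, getCell b i j = 'X' → getCell (searchTmpF m n f b ts).1 i j = 'X') ∧
    (∀ b c ds, muB (searchDirsF m n f b c ds).1 ≤ muB b ∧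
      ∀ i j, getCell b i j = 'X' → getCell (searchDirsF m n f b c ds).1 i j = 'X') := by
  intro f
  induction f using Nat.strong_induction_on with
  | _ f ih =>
  have hS : ∀ b c, muB (searchF m n f b c).1 ≤ muB b ∧
      ∀ i j, getCell b i j = 'X' → getCell (searchF m n f b c).1 i j = 'X' := by
    intro b c
    match f, ih with
    | 0, _ => simp [searchF]
    | g+1, ih =>
      rw [searchF]
      obtain ⟨h1, h2⟩ := (ih g (by omega)).2.2 (setCell b c) c dirsList
      exact ⟨le_trans h1 (muB_set_le b c),
        fun i j hx => h2 i j (getCell_persist b c i j hx)⟩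
  have hT : ∀ b ts, muB (searchTmpF m n f b ts).1 ≤ muB b ∧
      ∀ i j, getCell b i j = 'X' → getCell (searchTmpF m n f b ts).1 i j = 'X' := by
    intro b ts
    induction ts generalizing b with
    | nil => simp [searchTmpF]
    | cons t ts iht =>
      rw [searchTmpF]
      obtain ⟨a1, p1⟩ := hS b t
      obtain ⟨a2, p2⟩ := iht (searchF m n f b t).1
      exact ⟨le_trans a2 a1, fun i j hx => p2 i j (p1 i j hx)⟩
  have hD : ∀ b c ds, muB (searchDirsF m n f b c ds).1 ≤ muB b ∧
      ∀ i j, getCell b i j = 'X' → getCell (searchDirsF m n f b c ds).1 i j = 'X' := by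
    intro b c ds
    induction ds generalizing b with
    | nil => simp [searchDirsF]
    | cons d ds ihd =>
      rw [searchDirsF]
      split
      · rename_i hs1
        rcases hs2 : (scanRay m n b c.1 c.2 d.1 d.2 (scanFuel m n)).2 with _ | ⟨t, ts⟩
        · simpa [hs2] using ihd b
        · obtain ⟨a1, p1⟩ := hT ((t :: ts).foldl setCell b) (t :: ts)
          obtain ⟨a2, p2⟩ :=
            ihd (searchTmpF m n f ((t :: ts).foldl setCell b) (t :: ts)).1
          refine ⟨?_, ?_⟩
          · exact le_trans a2 (le_trans a1 (muB_foldl_le b (t :: ts)))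
          · intro i j hx
            exact p2 i j (p1 i j (getCell_foldl_persist i j (t :: ts) b hx))
      · exact ihd b
  exact ⟨hS, hT, hD⟩

-- fuel irrelevance: any sufficient fuel computes the same thing
theorem Irr (m n : Int) : ∀ K : Nat,
    (∀ f g b c, f + g ≤ K → muB b < f → muB b < g →
      searchF m n f b c = searchF m n g b c) ∧
    (∀ f g b ts, f + g ≤ K → muB b < f → muB b < g →
      searchTmpF m n f b ts = searchTmpF m n g b ts) ∧
    (∀ f g b c ds, f + g ≤ K → muB b ≤ f → muB b ≤ g →
      searchDirsF m n f b c ds = searchDirsF m n g b c ds) := by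
  intro K
  induction K using Nat.strong_induction_on with
  | _ K ih =>
  have hS : ∀ f g b c, f + g ≤ K → muB b < f → muB b < g →
      searchF m n f b c = searchF m n g b c := by
    intro f g b c hfg hf hg
    match f, g, hfg, hf, hg with
    | f'+1, g'+1, hfg, hf, hg =>
      rw [searchF, searchF]
      exact (ih (f' + g') (by omega)).2.2 f' g' (setCell b c) c dirsList le_rfl
        (le_trans (muB_set_le b c) (by omega)) (le_trans (muB_set_le b c) (by omega))
  have hT : ∀ f g b ts, f + g ≤ K → muB b < f → muB b < g →
      searchTmpF m n f b ts = searchTmpF m n g b ts := by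
    intro f g b ts hfg
    induction ts generalizing b with
    | nil => intro hf hg; rw [searchTmpF, searchTmpF]
    | cons t ts iht =>
      intro hf hg
      rw [searchTmpF, searchTmpF]
      rw [hS f g b t hfg hf hg]
      have hmu := (AM m n g).1 (searchF m n g b t |> fun _ => b) t |>.1
      have hmu' : muB (searchF m n g b t).1 ≤ muB b := ((AM m n g).1 b t).1
      rw [iht (searchF m n g b t).1 (by omega) (by omega)]
  have hD : ∀ f g b c ds, f + g ≤ K → muB b ≤ f → muB b ≤ g →
      searchDirsF m n f b c ds = searchDirsF m n g b c ds := by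
    intro f g b c ds hfg
    induction ds generalizing b with
    | nil => intro hf hg; rw [searchDirsF, searchDirsF]
    | cons d ds ihd =>
      intro hf hg
      rw [searchDirsF, searchDirsF]
      by_cases hs1 : (scanRay m n b c.1 c.2 d.1 d.2 (scanFuel m n)).1
      · simp only [hs1, if_true]
        rcases hs2 : (scanRay m n b c.1 c.2 d.1 d.2 (scanFuel m n)).2 with _ | ⟨t, ts⟩
        · exact ihd b hf hg
        · simp only []
          have htX : getCell b t.1 t.2 ≠ 'X' :=
            (scan_sound m n b _ c.1 c.2 d.1 d.2 t (by rw [hs2]; exact List.mem_cons_self ..)).1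
          have hb1 : muB ((t :: ts).foldl setCell b) < muB b := muB_foldl_lt b t ts htX
          rw [hT f g ((t :: ts).foldl setCell b) (t :: ts) hfg (by omega) (by omega)]
          have hmu2 : muB (searchTmpF m n g ((t :: ts).foldl setCell b) (t :: ts)).1 ≤
              muB ((t :: ts).foldl setCell b) :=
            ((AM m n g).2.1 ((t :: ts).foldl setCell b) (t :: ts)).1
          rw [ihd (searchTmpF m n g ((t :: ts).foldl setCell b) (t :: ts)).1
            (by omega) (by omega)]
      · simp only [hs1]
        exact ihd b hf hg
  exact ⟨hS, hT, hD⟩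

theorem IrrD (m n : Int) (f g : Nat) (b : PvBoard) (c : PvCell) (ds : List (Int × Int))
    (hf : muB b ≤ f) (hg : muB b ≤ g) :
    searchDirsF m n f b c ds = searchDirsF m n g b c ds :=
  (Irr m n (f + g)).2.2 f g b c ds le_rfl hf hg

-- B's direction scan agrees with A's fold over directions
theorem BR0 (m n : Int) (f : Nat) (c : PvCell) :
    ∀ (ds : List (Int × Int)) (b : PvBoard), procDirs m n b c ds = none →
      searchDirsF m n f b c ds = (b, 0) := by
  intro ds
  induction ds with
  | nil => intro b h; rw [searchDirsF]
  | cons d ds ih =>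
    intro b h
    rw [searchDirsF]
    rw [procDirs] at h
    by_cases hs1 : (scanRay m n b c.1 c.2 d.1 d.2 (scanFuel m n)).1
    · simp only [hs1, if_true]
      rcases hs2 : (scanRay m n b c.1 c.2 d.1 d.2 (scanFuel m n)).2 with _ | ⟨t, ts⟩
      · apply ih
        have : scanB m n b c d = [] := by simp [scanB, hs1, hs2]
        simpa [this] using h
      · exfalso
        have : scanB m n b c d = t :: ts := by simp [scanB, hs1, hs2]
        rw [this] at h
        simp at h
    · simp only [hs1]
      apply ih
      have : scanB m n b c d = [] := by simp [scanB, hs1]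
      simpa [this] using h

theorem BR1 (m n : Int) (f : Nat) (c : PvCell) :
    ∀ (ds : List (Int × Int)) (b b' : PvBoard) (tmp : List PvCell)
      (ds' : List (Int × Int)),
      procDirs m n b c ds = some (b', tmp, ds') →
      b' = tmp.foldl setCell b ∧ tmp ≠ [] ∧
      (∀ t ∈ tmp, getCell b t.1 t.2 ≠ 'X') ∧
      searchDirsF m n f b c ds =
        ((searchDirsF m n f (searchTmpF m n f b' tmp).1 c ds').1,
         (tmp.length : Int) + (searchTmpF m n f b' tmp).2 +
           (searchDirsF m n f (searchTmpF m n f b' tmp).1 c ds').2) := by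
  intro ds
  induction ds with
  | nil => intro b b' tmp ds' h; rw [procDirs] at h; cases h
  | cons d ds ih =>
    intro b b' tmp ds' h
    rw [procDirs] at h
    rw [searchDirsF]
    by_cases hs1 : (scanRay m n b c.1 c.2 d.1 d.2 (scanFuel m n)).1
    · rcases hs2 : (scanRay m n b c.1 c.2 d.1 d.2 (scanFuel m n)).2 with _ | ⟨t, ts⟩
      · have hB : scanB m n b c d = [] := by simp [scanB, hs1, hs2]
        rw [hB] at h
        simp only [List.isEmpty_nil, if_true] at h
        simpa [hs1, hs2] using ih b b' tmp ds' h
      · have hB : scanB m n b c d = t :: ts := by simp [scanB, hs1, hs2]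
        rw [hB] at h
        simp only [List.isEmpty_cons, if_false, Bool.false_eq_true] at h
        rw [Option.some.injEq, Prod.mk.injEq, Prod.mk.injEq] at h
        obtain ⟨hb, ht, hd⟩ := h
        subst ht hd
        refine ⟨hb.symm, by simp, ?_, ?_⟩
        · intro t' ht'
          exact (scan_sound m n b _ c.1 c.2 d.1 d.2 t' (by rw [hs2]; exact ht')).1
        · simp only [hs1, if_true, ← hb]
    · have hB : scanB m n b c d = [] := by simp [scanB, hs1]
      rw [hB] at h
      simp only [List.isEmpty_nil, if_true] at h
      simpa [hs1] using ih b b' tmp ds' h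

-- spec-side evaluation of a worklist: each frame runs A's direction fold at
-- canonical fuel
def runA (m n : Int) : PvBoard → List (PvCell × List (Int × Int)) → PvBoard × Int
  | b, [] => (b, 0)
  | b, (c, ds) :: rest =>
    let r1 := searchDirsF m n (muB b) b c ds
    let r2 := runA m n r1.1 rest
    (r2.1, r1.2 + r2.2)

theorem runA_append (m n : Int) :
    ∀ (xs ys : List (PvCell × List (Int × Int))) (b : PvBoard),
      runA m n b (xs ++ ys) =
        ((runA m n (runA m n b xs).1 ys).1,
         (runA m n b xs).2 + (runA m n (runA m n b xs).1 ys).2) := by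
  intro xs
  induction xs with
  | nil => intro ys b; simp [runA]
  | cons x xs ih =>
    intro ys b
    rcases x with ⟨c, ds⟩
    simp only [List.cons_append, runA]
    rw [ih ys]
    exact Prod.ext rfl (add_assoc ..).symm

theorem TmpRunA (m n : Int) :
    ∀ (ts : List PvCell) (f : Nat) (b : PvBoard),
      (∀ t ∈ ts, getCell b t.1 t.2 = 'X') → muB b < f →
      searchTmpF m n f b ts = runA m n b (ts.map (fun t => (t, dirsList))) := by
  intro ts
  induction ts with
  | nil => intro f b _ _; rw [searchTmpF]; simp [runA]
  | cons t ts ih =>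
    intro f b hX hf
    match f, hf with
    | g+1, hf =>
      rw [searchTmpF, searchF]
      rw [setCell_id b t (hX t (List.mem_cons_self ..))]
      rw [IrrD m n g (muB b) b t dirsList (by omega) le_rfl]
      simp only [List.map_cons, runA]
      have hmu : muB (searchDirsF m n (muB b) b t dirsList).1 ≤ muB b :=
        ((AM m n (muB b)).2.2 b t dirsList).1
      have hXp : ∀ t' ∈ ts,
          getCell (searchDirsF m n (muB b) b t dirsList).1 t'.1 t'.2 = 'X' :=
        fun t' ht' => ((AM m n (muB b)).2.2 b t dirsList).2 t'.1 t'.2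
          (hX t' (List.mem_cons_of_mem t ht'))
      rw [ih (g+1) (searchDirsF m n (muB b) b t dirsList).1 hXp (by omega)]

-- the simulation: B's worklist loop computes the runA value of its stack
theorem MainLoop (m n : Int) : ∀ N : Nat, ∀ b : PvBoard, muB b ≤ N →
    ∀ (stack : List (PvCell × List (Int × Int))) (cnt : Int),
      (∀ fr ∈ stack, getCell b fr.1.1 fr.1.2 = 'X') →
      flipLoop m n b cnt stack = cnt + (runA m n b stack).2 := by
  intro N
  induction N using Nat.strong_induction_on with
  | _ N ihN =>
  intro b hN stack
  induction stack with
  | nil => intro cnt _; rw [flipLoop]; simp [runA]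
  | cons fr rest ihrest =>
    rcases fr with ⟨c, ds⟩
    intro cnt hinv
    rw [flipLoop]
    cases hpd : procDirs m n b c ds with
    | none =>
      dsimp only
      rw [ihrest cnt (fun fr hfr => hinv fr (List.mem_cons_of_mem _ hfr))]
      have h0 := BR0 m n (muB b) c ds b hpd
      simp [runA, h0]
    | some x =>
      rcases x with ⟨b', tmp, ds'⟩
      dsimp only
      have hmu : muB b' < muB b := procDirs_mu m n b b' c tmp ds' ds hpd
      obtain ⟨hb', htne, hnX, heq⟩ := BR1 m n (muB b) c ds b b' tmp ds' hpd
      -- invariant for the new stack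
      have hinv' : ∀ fr ∈ (tmp.map (fun t => (t, dirsList)) ++ (c, ds') :: rest),
          getCell b' fr.1.1 fr.1.2 = 'X' := by
        intro fr hfr
        rcases List.mem_append.1 hfr with hfr | hfr
        · obtain ⟨t, htmem, rfl⟩ := List.mem_map.1 hfr
          rw [hb']; exact getCell_foldl_mem tmp b t htmem
        · rcases List.mem_cons.1 hfr with rfl | hfr
          · rw [hb']
            exact getCell_foldl_persist _ _ tmp b (hinv (c, ds) (List.mem_cons_self ..))
          · rw [hb']
            exact getCell_foldl_persist _ _ tmp b (hinv fr (List.mem_cons_of_mem _ hfr))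
      rw [ihN (muB b') (by omega) b' le_rfl _ (cnt + tmp.length) hinv']
      -- now compute runA on both stacks
      have htmpX : ∀ t ∈ tmp, getCell b' t.1 t.2 = 'X' := by
        intro t ht; rw [hb']; exact getCell_foldl_mem tmp b t ht
      have hrt : searchTmpF m n (muB b) b' tmp =
          runA m n b' (tmp.map (fun t => (t, dirsList))) :=
        TmpRunA m n tmp (muB b) b' htmpX hmu
      rw [runA_append]
      rw [← hrt]
      -- abbreviations
      have hmuT : muB (searchTmpF m n (muB b) b' tmp).1 ≤ muB b' :=
        ((AM m n (muB b)).2.1 b' tmp).1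
      -- the (c, ds') frame runs at canonical fuel; align it with fuel muB b
      have hcds : runA m n (searchTmpF m n (muB b) b' tmp).1 ((c, ds') :: rest) =
          (( runA m n (searchDirsF m n (muB b) (searchTmpF m n (muB b) b' tmp).1 c ds').1 rest).1,
           (searchDirsF m n (muB b) (searchTmpF m n (muB b) b' tmp).1 c ds').2 +
             (runA m n (searchDirsF m n (muB b) (searchTmpF m n (muB b) b' tmp).1 c ds').1 rest).2) := by
        simp only [runA]
        rw [IrrD m n (muB (searchTmpF m n (muB b) b' tmp).1) (muB b)
          (searchTmpF m n (muB b) b' tmp).1 c ds' le_rfl (by omega)]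
      rw [hcds]
      -- and the left-hand side frame
      simp only [runA, heq]
      ring

-- B's counter never decreases, so every seed value is nonnegative
theorem flipLoop_ge (m n : Int) : ∀ N : Nat, ∀ b : PvBoard, muB b ≤ N →
    ∀ (stack : List (PvCell × List (Int × Int))) (cnt : Int),
      cnt ≤ flipLoop m n b cnt stack := by
  intro N
  induction N using Nat.strong_induction_on with
  | _ N ihN =>
  intro b hN stack
  induction stack with
  | nil => intro cnt; rw [flipLoop]
  | cons fr rest ihrest =>
    rcases fr with ⟨c, ds⟩
    intro cnt
    rw [flipLoop]
    cases hpd : procDirs m n b c ds with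
    | none => dsimp only; exact ihrest cnt
    | some x =>
      rcases x with ⟨b', tmp, ds'⟩
      dsimp only
      have hmu : muB b' < muB b := procDirs_mu m n b b' c tmp ds' ds hpd
      calc cnt ≤ cnt + (tmp.length : Int) := by omega
        _ ≤ _ := ihN (muB b') (by omega) b' le_rfl _ _

theorem flipsB_nonneg (m n : Int) (b : PvBoard) (c : PvCell) : 0 ≤ flipsB m n b c := by
  unfold flipsB
  exact flipLoop_ge m n (muB (setCell b c)) (setCell b c) le_rfl [(c, dirsList)] 0

-- one seed: A's recursive search equals B's worklist run
theorem perSeed (m n : Int) (rows : PvBoard) (c : PvCell) :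
    (searchF m n (muB rows + 1) rows c).2 = flipsB m n rows c := by
  unfold flipsB
  rw [searchF]
  have hinv : ∀ fr ∈ [(c, dirsList)], getCell (setCell rows c) fr.1.1 fr.1.2 = 'X' := by
    intro fr hfr
    rcases List.mem_singleton.1 hfr with rfl
    exact getCell_set_self rows c
  rw [MainLoop m n (muB (setCell rows c)) (setCell rows c) le_rfl [(c, dirsList)] 0 hinv]
  simp only [runA]
  rw [IrrD m n (muB (setCell rows c)) (muB rows) (setCell rows c) c dirsList le_rfl
    (muB_set_le rows c)]
  ring

-- ===== VERDICT (by name: the statement is the Claim_ definition above) =====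
theorem flipChess_spec : Claim_equal_flipChess := by
  intro cb _ _
  unfold Spec_flipChess
  have h : ∀ (i j : Int),
      (searchF (cb.length : Int) ((cb.headD "").toList.length : Int)
        (muB (cb.map (·.toList)) + 1) (cb.map (·.toList)) (i, j)).2 =
      flipsB (cb.length : Int) ((cb.headD "").toList.length : Int)
        (cb.map (·.toList)) (i, j) :=
    fun i j => perSeed _ _ _ _
  simp only [flipChess, flipChess_alt, h]
  set VV := List.flatMap
      (fun i =>
        List.map
          (fun j => flipsB (↑cb.length) (↑(cb.headD "").toList.length)
            (List.map (fun x => x.toList) cb) (i, j))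
          (List.filter (fun j => decide (getCell (List.map (fun x => x.toList) cb) i j = '.'))
            (PySem.List.pyRange 0 ↑(cb.headD "").toList.length)))
      (PySem.List.pyRange 0 ↑cb.length) with hVV
  trans (VV.foldl max 0)
  · have hv : ∀ v ∈ VV, 0 ≤ v := by
      intro v hvm
      rw [hVV] at hvm
      obtain ⟨i, -, hvm⟩ := List.mem_flatMap.1 hvm
      obtain ⟨j, -, rfl⟩ := List.mem_map.1 hvm
      exact flipsB_nonneg _ _ _ _
    clear_value VV
    cases VV with
    | nil => rfl
    | cons v vs =>
      simp only [List.foldl_cons]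
      rw [max_eq_right (hv v (List.mem_cons_self ..))]
  · rw [hVV, List.foldl_flatMap]
    congr 1
    funext best i
    rw [List.foldl_map, List.foldl_filter]
    congr 1
    funext acc j
    split <;> rename_i hsp <;> simp only [decide_eq_true_eq] at hsp <;> simp [hsp]
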